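-- pv_equiv track=rewrite | github.com/YaireAC/CS361-Project-Edit- | microB.py | organize_by_genre
-- ===== SOURCE A (Python) =====
-- def organize_by_genre(artists):
--     genres = {}
--     for artist in artists:
--         genre = artist[1]
--         if genre not in genres:
--             genres[genre] = []
--         genres[genre].append(artist)
--     return genres
-- ===== SOURCE B (Python) =====
-- def organize_by_genre(artists):
--     genres = []
--     for a in artists:
--         if a[1] not in genres:
--             genres.append(a[1])
--     return {g: [a for a in artists if a[1] == g] for g in genres}
-- ===== Notes on version B (the rewrite author's own statement) =====
-- stated objective: alternative
-- what changed: Instead of building the dict incrementally with per-key list appends, B first collects the distinct genres in first-appearance order and then builds the result in one dict comprehension, each group a filter of the input.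
import Mathlib
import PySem

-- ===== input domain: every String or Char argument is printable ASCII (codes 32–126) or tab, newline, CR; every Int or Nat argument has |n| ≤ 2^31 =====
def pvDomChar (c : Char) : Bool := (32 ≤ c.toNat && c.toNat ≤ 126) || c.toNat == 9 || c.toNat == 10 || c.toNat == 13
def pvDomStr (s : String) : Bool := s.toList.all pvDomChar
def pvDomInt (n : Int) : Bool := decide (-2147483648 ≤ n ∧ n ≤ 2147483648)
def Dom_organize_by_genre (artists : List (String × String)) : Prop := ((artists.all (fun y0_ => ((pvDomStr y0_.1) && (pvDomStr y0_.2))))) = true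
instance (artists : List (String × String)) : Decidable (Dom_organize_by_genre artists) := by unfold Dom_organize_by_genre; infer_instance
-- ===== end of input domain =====

-- B first collects the distinct genres in first-appearance order and then builds each group
-- by filtering the input once per genre, instead of A's incremental dict with per-key appends
-- (an alternative decomposition; not claimed faster).

-- ===== PORT A =====
def organize_by_genre (artists : List (String × String)) : List (String × List (String × String)) :=
  (artists.foldl (fun genres artist =>
      let genre := artist.2
      let genres := if genres.contains genre then genres else genres.insert genre []
      genres.modify genre [] (fun l => l ++ [artist]))
    PySem.Dict.empty).items

-- ===== PORT B =====
def organize_by_genre_alt (artists : List (String × String)) : List (String × List (String × String)) :=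
  let genres : PySem.Set String :=
    artists.foldl (fun gs a => PySem.Set.add gs a.2) PySem.Set.empty
  genres.map (fun g => (g, artists.filter (fun a => a.2 == g)))

-- ===== PRECONDITION & SPEC =====
def Spec_organize_by_genre (artists : List (String × String)) (out : List (String × List (String × String))) : Prop := out = organize_by_genre_alt artists
instance (artists : List (String × String)) (out : List (String × List (String × String))) : Decidable (Spec_organize_by_genre artists out) := by unfold Spec_organize_by_genre; infer_instance

-- ===== CLAIM (what is proved, stated in full; the proofs are below) =====
def Claim_equal_organize_by_genre : Prop := ∀ (artists : List (String × String)), Dom_organize_by_genre artists → Spec_organize_by_genre artists (organize_by_genre artists)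

-- ===== LEMMAS AND PROOFS =====

-- A's per-artist step (insert-empty-if-absent, then append) is exactly one `modify`.
theorem pv_step_eq (d : PySem.Dict String (List (String × String))) (a : String × String) :
    (if d.contains a.2 then d else d.insert a.2 []).modify a.2 [] (fun l => l ++ [a])
      = d.modify a.2 [] (fun l => l ++ [a]) := by
  by_cases hc : d.contains a.2 = true
  · rw [if_pos hc]
  · rw [if_neg hc]
    have h : d.contains a.2 = false := by simpa using hc
    have hg : (d.insert a.2 []).getD a.2 [] = [] := by
      simp [PySem.Dict.getD_insert_self]
    have hd : d.getD a.2 [] = [] := by simp [PySem.Dict.getD_of_not_contains, h]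
    simp only [PySem.Dict.modify, hg, hd]
    exact PySem.Dict.insert_insert_self d a.2 [] ([] ++ [a])

-- A's whole loop equals a plain modify-fold.
theorem pv_foldA_eq (artists : List (String × String))
    (d : PySem.Dict String (List (String × String))) :
    artists.foldl (fun genres artist =>
        let genre := artist.2
        let genres := if genres.contains genre then genres else genres.insert genre []
        genres.modify genre [] (fun l => l ++ [artist])) d
      = artists.foldl (fun d a => d.modify a.2 [] (fun l => l ++ [a])) d := by
  induction artists generalizing d with
  | nil => rfl
  | cons a t ih =>
    simp only [List.foldl_cons]
    rw [pv_step_eq d a, ih]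

theorem pv_keys_eq (artists : List (String × String)) :
    (artists.foldl (fun d a => d.modify a.2 [] (fun l => l ++ [a])) PySem.Dict.empty).keys
      = PySem.Set.ofList (artists.map (fun a => a.2)) := by
  rw [PySem.Dict.keys_foldl_modify_key]
  simp [PySem.Set.update, PySem.Set.ofList, PySem.Dict.keys_empty]

theorem pv_nodup_keys (artists : List (String × String)) :
    (artists.foldl (fun d a => d.modify a.2 [] (fun l => l ++ [a])) PySem.Dict.empty).keys.Nodup := by
  exact PySem.Dict.nodup_keys_foldl_modify_key artists (fun a => a.2) []
    (fun _ a l => l ++ [a]) PySem.Dict.empty (by simp [PySem.Dict.keys_empty])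

theorem pv_getD_eq (artists : List (String × String)) (c : String) :
    (artists.foldl (fun d a => d.modify a.2 [] (fun l => l ++ [a])) PySem.Dict.empty).getD c []
      = artists.filter (fun a => a.2 == c) := by
  have hm : artists.foldl (fun d a => d.modify a.2 [] (fun l => l ++ [a])) PySem.Dict.empty
      = (artists.map (fun a => (a.2, a))).foldl
          (fun d p => d.modify p.1 [] (fun l => l ++ [p.2])) PySem.Dict.empty := by
    rw [List.foldl_map]
  rw [hm, PySem.Dict.getD_foldl_modify_append]
  simp [List.filter_map, Function.comp_def]

theorem pv_altSet_eq (artists : List (String × String)) :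
    artists.foldl (fun gs a => PySem.Set.add gs a.2) PySem.Set.empty
      = PySem.Set.ofList (artists.map (fun a => a.2)) := by
  rw [PySem.Set.ofList_eq_foldl, List.foldl_map]
  rfl

-- ===== VERDICT (by name: the statement is the Claim_ definition above) =====
theorem organize_by_genre_spec : Claim_equal_organize_by_genre := by
  intro artists _
  unfold Spec_organize_by_genre organize_by_genre organize_by_genre_alt
  rw [pv_foldA_eq]
  rw [PySem.Dict.items_eq_map_keys _ (pv_nodup_keys artists) []]
  rw [pv_keys_eq, pv_altSet_eq]
  refine List.map_congr_left ?_
  intro g _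
  rw [pv_getD_eq]
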